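-- pv_equiv track=rewrite | github.com/Lazarus-XD/2048_UI | Midterm/src/SeqServicesLibrary.py | new_max_val
-- ===== SOURCE A (Python) =====
-- def max_val(s):
--     if len(s) == 0:
--         raise ValueError
--     return max(s)
--
-- def new_max_val(s, f):
--     if len(s) == 0:
--         raise ValueError
--     lst = []
--     for i in s:
--         if f:
--             lst.append(i)
--     return max_val(lst)
-- ===== SOURCE B (Python) =====
-- def new_max_val(s, f):
--     if len(s) == 0 or not f:
--         raise ValueError
--     return max(s)
-- ===== Notes on version B (the rewrite author's own statement) =====
-- stated objective: simpler
-- what changed: Replaces the flag-conditional list-building loop plus helper call with a single guard (empty or falsy flag raises ValueError) and a direct max(s).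
import Mathlib
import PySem

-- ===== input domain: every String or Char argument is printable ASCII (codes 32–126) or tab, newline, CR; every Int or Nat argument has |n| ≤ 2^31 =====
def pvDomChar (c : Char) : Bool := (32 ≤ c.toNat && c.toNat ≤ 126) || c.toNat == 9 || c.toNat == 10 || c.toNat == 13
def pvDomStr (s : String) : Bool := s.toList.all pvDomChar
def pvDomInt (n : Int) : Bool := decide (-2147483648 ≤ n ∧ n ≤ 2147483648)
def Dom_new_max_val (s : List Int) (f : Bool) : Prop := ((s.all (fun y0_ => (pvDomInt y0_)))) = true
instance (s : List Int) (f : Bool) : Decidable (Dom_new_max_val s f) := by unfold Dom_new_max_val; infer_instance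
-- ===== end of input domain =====

-- B replaces A's flag-conditional list-building loop and helper call by a single guard plus a direct max (objective: simpler).


-- ===== PORT A =====
-- helper max_val: raises on empty list (excluded by Pre_), else max(lst)
def max_val_A (lst : List Int) : Int :=
  (PySem.List.max? lst (fun y => y)).getD 0

def new_max_val (s : List Int) (f : Bool) : Int :=
  let lst := s.foldl (fun acc i => if f then acc ++ [i] else acc) []
  max_val_A lst

-- ===== PORT B =====
def new_max_val_alt (s : List Int) (f : Bool) : Int :=
  if s.isEmpty || !f then 0   -- Python B raises ValueError here; excluded by Pre_
  else (PySem.List.max? s (fun y => y)).getD 0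

-- ===== PRECONDITION & SPEC =====
-- Pre_ excludes exactly the inputs where both Pythons raise ValueError: empty s, or a falsy flag f.
def Pre_new_max_val (s : List Int) (f : Bool) : Prop := s ≠ [] ∧ f = true
instance (s : List Int) (f : Bool) : Decidable (Pre_new_max_val s f) := by unfold Pre_new_max_val; infer_instance
def pvWitness_new_max_val : List Int × Bool := ([3, 1, 2], true)

def Spec_new_max_val (s : List Int) (f : Bool) (out : Int) : Prop := out = new_max_val_alt s f
instance (s : List Int) (f : Bool) (out : Int) : Decidable (Spec_new_max_val s f out) := by unfold Spec_new_max_val; infer_instance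

-- ===== CLAIM (what is proved, stated in full; the proofs are below) =====
def Claim_equal_new_max_val : Prop := ∀ (s : List Int) (f : Bool), Dom_new_max_val s f → Pre_new_max_val s f → Spec_new_max_val s f (new_max_val s f)

-- ===== LEMMAS AND PROOFS =====
theorem foldl_append_true (s : List Int) (init : List Int) :
    s.foldl (fun acc i => if true then acc ++ [i] else acc) init = init ++ s := by
  induction s generalizing init with
  | nil => simp
  | cons h t ih =>
      rw [List.foldl_cons, if_pos rfl, ih]
      simp

-- ===== VERDICT (by name: the statement is the Claim_ definition above) =====
theorem new_max_val_spec : Claim_equal_new_max_val := by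
  intro s f _ hpre
  obtain ⟨hs, hf⟩ := hpre
  subst hf
  unfold Spec_new_max_val new_max_val new_max_val_alt max_val_A
  rw [foldl_append_true]
  simp [List.isEmpty_iff, hs]
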